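-- pv_equiv track=rewrite | github.com/SohaibAamir28/M-IT-2-2025-Winter-Contest | advanced/4.py | drawing_lines
-- ===== SOURCE A (Python) =====
-- MOD = 10**9 + 7
--
-- def drawing_lines(n, points):
--     from collections import defaultdict
--
--     ud_x, lr_y = set(), set()
--     for x, y, s in points:
--         if s == "UD":
--             if x in ud_x:
--                 return "NO", 0
--             ud_x.add(x)
--         else:
--             if y in lr_y:
--                 return "NO", 0
--             lr_y.add(y)
--
--     count = pow(2, len(ud_x) + len(lr_y), MOD)
--     return "YES", count
-- ===== SOURCE B (Python) =====
-- MOD = 10**9 + 7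
--
--
-- def _has_adjacent_dup(sorted_vals):
--     for a, b in zip(sorted_vals, sorted_vals[1:]):
--         if a == b:
--             return True
--     return False
--
--
-- def drawing_lines(n, points):
--     xs = sorted(x for x, y, s in points if s == "UD")
--     ys = sorted(y for x, y, s in points if s != "UD")
--     if _has_adjacent_dup(xs) or _has_adjacent_dup(ys):
--         return "NO", 0
--     return "YES", pow(2, len(xs) + len(ys), MOD)
-- ===== Notes on version B (the rewrite author's own statement) =====
-- stated objective: alternative
-- what changed: Replaces the single-pass hash-set membership loop with early return by partitioning the coordinates into two lists, sorting each, and detecting duplicates via an adjacent-pair scan of the sorted lists.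
import Mathlib
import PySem

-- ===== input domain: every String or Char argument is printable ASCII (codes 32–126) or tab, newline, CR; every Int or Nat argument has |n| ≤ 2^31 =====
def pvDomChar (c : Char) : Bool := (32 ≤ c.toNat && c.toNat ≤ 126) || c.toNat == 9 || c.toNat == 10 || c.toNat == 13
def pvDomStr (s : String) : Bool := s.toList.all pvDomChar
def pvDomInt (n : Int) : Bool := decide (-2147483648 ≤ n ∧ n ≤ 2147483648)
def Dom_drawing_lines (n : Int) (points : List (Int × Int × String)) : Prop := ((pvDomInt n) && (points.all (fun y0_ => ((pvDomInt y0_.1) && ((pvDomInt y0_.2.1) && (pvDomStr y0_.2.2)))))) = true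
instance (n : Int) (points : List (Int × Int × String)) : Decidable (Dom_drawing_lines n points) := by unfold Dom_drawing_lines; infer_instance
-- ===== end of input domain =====

-- B detects duplicate coordinates by sorting each partition and scanning adjacent
-- pairs instead of A's single pass with hash-set membership; alternative, not faster.

def pvMOD : Int := 1000000007

-- ===== PORT A =====
-- the loop over points with the two sets and early returns
def pvGoA : List (Int × Int × String) → PySem.Set Int → PySem.Set Int → String × Int
  | [], ud_x, lr_y => ("YES", PySem.Int.powMod 2 (ud_x.length + lr_y.length) pvMOD)
  | (x, y, s) :: rest, ud_x, lr_y =>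
    if s == "UD" then
      if PySem.Set.contains ud_x x then ("NO", 0)
      else pvGoA rest (PySem.Set.add ud_x x) lr_y
    else
      if PySem.Set.contains lr_y y then ("NO", 0)
      else pvGoA rest ud_x (PySem.Set.add lr_y y)

def drawing_lines (_n : Int) (points : List (Int × Int × String)) : String × Int :=
  pvGoA points PySem.Set.empty PySem.Set.empty

-- ===== PORT B =====
-- zip(lst, lst[1:]) adjacency scan
def pvHasAdjDup : List Int → Bool
  | a :: b :: t => a == b || pvHasAdjDup (b :: t)
  | _ => false

def drawing_lines_alt (_n : Int) (points : List (Int × Int × String)) : String × Int :=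
  let xs := PySem.List.sorted ((points.filter (fun p => p.2.2 == "UD")).map (fun p => p.1)) (fun v => v) false
  let ys := PySem.List.sorted ((points.filter (fun p => !(p.2.2 == "UD"))).map (fun p => p.2.1)) (fun v => v) false
  if pvHasAdjDup xs || pvHasAdjDup ys then ("NO", 0)
  else ("YES", PySem.Int.powMod 2 (xs.length + ys.length) pvMOD)

-- ===== PRECONDITION & SPEC =====
def Spec_drawing_lines (n : Int) (points : List (Int × Int × String)) (out : String × Int) : Prop := out = drawing_lines_alt n points
instance (n : Int) (points : List (Int × Int × String)) (out : String × Int) : Decidable (Spec_drawing_lines n points out) := by unfold Spec_drawing_lines; infer_instance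

-- ===== CLAIM (what is proved, stated in full; the proofs are below) =====
def Claim_equal_drawing_lines : Prop := ∀ (n : Int) (points : List (Int × Int × String)), Dom_drawing_lines n points → Spec_drawing_lines n points (drawing_lines n points)

-- ===== LEMMAS AND PROOFS =====

def pvXs (pts : List (Int × Int × String)) : List Int :=
  (pts.filter (fun p => p.2.2 == "UD")).map (fun p => p.1)

def pvYs (pts : List (Int × Int × String)) : List Int :=
  (pts.filter (fun p => !(p.2.2 == "UD"))).map (fun p => p.2.1)

-- adjacent-dup scan of a ≤-sorted list detects exactly non-Nodup
theorem pvHasAdjDup_false_iff (s : List Int) (h : s.Pairwise (· ≤ ·)) :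
    pvHasAdjDup s = false ↔ s.Nodup := by
  induction s with
  | nil => simp [pvHasAdjDup]
  | cons a t ih =>
    cases t with
    | nil => simp [pvHasAdjDup]
    | cons b u =>
      have htail : (b :: u).Pairwise (· ≤ ·) := h.tail
      have hab : a ≤ b := (List.pairwise_cons.mp h).1 b (List.mem_cons_self)
      have hbu : ∀ c ∈ u, b ≤ c := fun c hc => (List.pairwise_cons.mp htail).1 c hc
      have ihh := ih htail
      constructor
      · intro hfalse
        simp only [pvHasAdjDup, Bool.or_eq_false_iff, beq_eq_false_iff_ne] at hfalse
        obtain ⟨hne, hrest⟩ := hfalse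
        have hnd : (b :: u).Nodup := ihh.mp hrest
        refine List.nodup_cons.mpr ⟨?_, hnd⟩
        intro hmem
        rcases List.mem_cons.mp hmem with h1 | h2
        · exact hne h1
        · have : a < b := lt_of_le_of_ne hab hne
          have : a < a := lt_of_lt_of_le (lt_of_le_of_ne hab hne) (hbu a h2)
          exact lt_irrefl a this
      · intro hnd
        obtain ⟨hna, hndt⟩ := List.nodup_cons.mp hnd
        simp only [pvHasAdjDup, Bool.or_eq_false_iff, beq_eq_false_iff_ne]
        exact ⟨fun hab' => hna (hab' ▸ List.mem_cons_self), ihh.mpr hndt⟩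

theorem pvHasAdjDup_sorted (l : List Int) :
    pvHasAdjDup (PySem.List.sorted l (fun v => v) false) = false ↔ l.Nodup := by
  rw [pvHasAdjDup_false_iff _ (PySem.List.sorted_pairwise l (fun v => v))]
  exact (PySem.List.sorted_perm l (fun v => v) false).nodup_iff

-- characterisation of A's loop
theorem pvGoA_char (pts : List (Int × Int × String)) :
    ∀ (ud lr : List Int), ud.Nodup → lr.Nodup →
    pvGoA pts ud lr =
      if (ud ++ pvXs pts).Nodup ∧ (lr ++ pvYs pts).Nodup
      then ("YES", PySem.Int.powMod 2 (ud.length + (pvXs pts).length + (lr.length + (pvYs pts).length)) pvMOD)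
      else ("NO", 0) := by
  induction pts with
  | nil =>
    intro ud lr hud hlr
    simp [pvGoA, pvXs, pvYs, hud, hlr]
  | cons p rest ih =>
    intro ud lr hud hlr
    obtain ⟨x, y, s⟩ := p
    by_cases hs : s == "UD"
    · have hx : pvXs ((x, y, s) :: rest) = x :: pvXs rest := by
        simp [pvXs, hs]
      have hy : pvYs ((x, y, s) :: rest) = pvYs rest := by
        simp [pvYs, hs]
      rw [hx, hy]
      by_cases hmem : x ∈ ud
      · have hcontains : PySem.Set.contains ud x = true := (PySem.Set.contains_iff _ _).mpr hmem
        have : ¬ (ud ++ x :: pvXs rest).Nodup := by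
          intro hn
          exact (List.disjoint_of_nodup_append hn) hmem List.mem_cons_self
        simp only [pvGoA, hs, hcontains, if_pos]
        rw [if_neg]
        intro ⟨h1, _⟩; exact this h1
      · have hcontains : PySem.Set.contains ud x = false := by
          rw [← Bool.not_eq_true]; intro hc; exact hmem (((PySem.Set.contains_iff _ _).mp hc))
        have hadd : PySem.Set.add ud x = ud ++ [x] := PySem.Set.add_of_not_mem hmem
        have hudx : (ud ++ [x]).Nodup := by
          rw [List.nodup_append]
          exact ⟨hud, List.nodup_singleton x, by
            intro a ha b hb hab
            rw [List.mem_singleton] at hb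
            subst hb; subst hab; exact hmem ha⟩
        simp only [pvGoA, hs, hcontains, if_true, Bool.false_eq_true, if_false]
        rw [hadd, ih (ud ++ [x]) lr hudx hlr]
        have hassoc : (ud ++ [x]) ++ pvXs rest = ud ++ x :: pvXs rest := by simp
        rw [hassoc]
        have hlen : (ud ++ [x]).length + (pvXs rest).length = ud.length + (x :: pvXs rest).length := by
          simp; omega
        rw [hlen]
    · have hx : pvXs ((x, y, s) :: rest) = pvXs rest := by
        simp [pvXs, hs]
      have hy : pvYs ((x, y, s) :: rest) = y :: pvYs rest := by
        simp [pvYs, hs]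
      rw [hx, hy]
      by_cases hmem : y ∈ lr
      · have hcontains : PySem.Set.contains lr y = true := (PySem.Set.contains_iff _ _).mpr hmem
        have : ¬ (lr ++ y :: pvYs rest).Nodup := by
          intro hn
          exact (List.disjoint_of_nodup_append hn) hmem List.mem_cons_self
        simp only [pvGoA, hs, hcontains, if_true, Bool.false_eq_true, if_false]
        rw [if_neg]
        intro ⟨_, h2⟩; exact this h2
      · have hcontains : PySem.Set.contains lr y = false := by
          rw [← Bool.not_eq_true]; intro hc; exact hmem (((PySem.Set.contains_iff _ _).mp hc))
        have hadd : PySem.Set.add lr y = lr ++ [y] := PySem.Set.add_of_not_mem hmem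
        have hlry : (lr ++ [y]).Nodup := by
          rw [List.nodup_append]
          exact ⟨hlr, List.nodup_singleton y, by
            intro a ha b hb hab
            rw [List.mem_singleton] at hb
            subst hb; subst hab; exact hmem ha⟩
        simp only [pvGoA, hs, hcontains, Bool.false_eq_true, if_false]
        rw [hadd, ih ud (lr ++ [y]) hud hlry]
        have hassoc : (lr ++ [y]) ++ pvYs rest = lr ++ y :: pvYs rest := by simp
        rw [hassoc]
        have hlen : ud.length + (pvXs rest).length + ((lr ++ [y]).length + (pvYs rest).length)
            = ud.length + (pvXs rest).length + (lr.length + (y :: pvYs rest).length) := by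
          simp; omega
        rw [hlen]

-- characterisation of B
theorem pvAlt_char (n : Int) (pts : List (Int × Int × String)) :
    drawing_lines_alt n pts =
      if (pvXs pts).Nodup ∧ (pvYs pts).Nodup
      then ("YES", PySem.Int.powMod 2 ((pvXs pts).length + (pvYs pts).length) pvMOD)
      else ("NO", 0) := by
  show (if pvHasAdjDup (PySem.List.sorted (pvXs pts) (fun v => v) false)
          || pvHasAdjDup (PySem.List.sorted (pvYs pts) (fun v => v) false)
        then ("NO", 0)
        else ("YES", PySem.Int.powMod 2
          ((PySem.List.sorted (pvXs pts) (fun v => v) false).length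
            + (PySem.List.sorted (pvYs pts) (fun v => v) false).length) pvMOD)) = _
  by_cases hx : (pvXs pts).Nodup <;> by_cases hy : (pvYs pts).Nodup
  · rw [(pvHasAdjDup_sorted (pvXs pts)).mpr hx, (pvHasAdjDup_sorted (pvYs pts)).mpr hy]
    simp [hx, hy, PySem.List.length_sorted]
  · have h2 : pvHasAdjDup (PySem.List.sorted (pvYs pts) (fun v => v) false) = true := by
      rw [← Bool.not_eq_false, pvHasAdjDup_sorted]; exact hy
    rw [h2]
    simp [hy]
  · have h1 : pvHasAdjDup (PySem.List.sorted (pvXs pts) (fun v => v) false) = true := by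
      rw [← Bool.not_eq_false, pvHasAdjDup_sorted]; exact hx
    rw [h1]
    simp [hx]
  · have h1 : pvHasAdjDup (PySem.List.sorted (pvXs pts) (fun v => v) false) = true := by
      rw [← Bool.not_eq_false, pvHasAdjDup_sorted]; exact hx
    rw [h1]
    simp [hx]

-- ===== VERDICT (by name: the statement is the Claim_ definition above) =====
theorem drawing_lines_spec : Claim_equal_drawing_lines := by
  intro n points _
  show drawing_lines n points = drawing_lines_alt n points
  rw [pvAlt_char]
  unfold drawing_lines
  rw [show PySem.Set.empty = ([] : List Int) from rfl,
    pvGoA_char points [] [] List.nodup_nil List.nodup_nil]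
  simp only [List.nil_append, List.length_nil, Nat.zero_add]
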